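-- pv_equiv track=rewrite | github.com/leeeesanggyu/langchain-study | lcel/custom_generator.py | split_into_list
-- ===== SOURCE A (Python) =====
-- from typing import Iterator, List
--
-- def split_into_list(input: Iterator[str]) -> Iterator[List[str]]:
--     # 쉼표가 나올 때까지 부분 입력을 보관합니다.
--     buffer = ""
--     for chunk in input:
--         # 현재 청크를 버퍼에 추가합니다.
--         buffer += chunk
--         # 버퍼에 쉼표가 있는 동안 반복합니다.
--         while "," in buffer:
--             # 버퍼를 쉼표로 분할합니다.
--             comma_index = buffer.index(",")
--             # 쉼표 이전의 모든 내용을 반환합니다.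
--             yield [buffer[:comma_index].strip()]
--             # 나머지는 다음 반복을 위해 저장합니다.
--             buffer = buffer[comma_index + 1 :]
--     # 마지막 청크를 반환합니다.
--     yield [buffer.strip()]
-- ===== SOURCE B (Python) =====
-- from typing import Iterator, List
--
-- def split_into_list(input: Iterator[str]) -> Iterator[List[str]]:
--     # Character-level scanner: one accumulator, no buffer indexing/slicing.
--     current = ""
--     for chunk in input:
--         for ch in chunk:
--             if ch == ",":
--                 yield [current.strip()]
--                 current = ""
--             else:
--                 current += ch
--     yield [current.strip()]
-- ===== Notes on version B (the rewrite author's own statement) =====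
-- stated objective: faster
-- what changed: Replaced the buffer with repeated index()/slice inner while-loop by a character-level scanner that keeps one accumulator string and yields on each comma, with no substring search or re-slicing of the buffer.
import Mathlib
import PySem

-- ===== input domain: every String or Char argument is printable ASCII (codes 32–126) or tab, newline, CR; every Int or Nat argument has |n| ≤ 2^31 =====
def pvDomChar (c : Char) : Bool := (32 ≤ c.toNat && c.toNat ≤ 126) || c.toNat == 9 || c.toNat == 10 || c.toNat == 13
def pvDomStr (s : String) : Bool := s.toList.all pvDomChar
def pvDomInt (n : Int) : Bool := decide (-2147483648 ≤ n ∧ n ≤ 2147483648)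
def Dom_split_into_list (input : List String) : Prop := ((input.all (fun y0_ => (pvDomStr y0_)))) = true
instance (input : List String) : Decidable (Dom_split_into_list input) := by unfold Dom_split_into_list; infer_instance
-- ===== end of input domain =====

-- B replaces A's buffer-with-index()/slice inner while-loop by a character-level scanner
-- with a single accumulator; a timing run measured B faster (A re-slices the buffer at each comma).


-- ===== PORT A =====
-- the inner `while "," in buffer:` loop; strings are carried as List Char (PySem.Chars is
-- the exact model of Python str on this domain)
def pvWhileA (buffer : List Char) : List (List String) × List Char :=
  if h : PySem.Chars.isIn [','] buffer then
    -- comma_index = buffer.index(",")  (guarded by the while condition, so it never raises)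
    let commaIndex := (PySem.Chars.find buffer [',']).toNat
    -- yield [buffer[:comma_index].strip()]
    let piece := [String.ofList (PySem.Chars.strip (PySem.List.slice buffer none (some (commaIndex : Int))))]
    -- buffer = buffer[comma_index + 1:]
    let rest := PySem.List.slice buffer (some ((commaIndex : Int) + 1)) none
    let r := pvWhileA rest
    (piece :: r.1, r.2)
  else ([], buffer)
termination_by buffer.length
decreasing_by
  have hne : buffer ≠ [] := by
    intro hb; subst hb; simp [PySem.Chars.isIn, PySem.Chars.find, PySem.Chars.find.go] at h
  have hlen : buffer.length ≠ 0 := by simpa using hne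
  rw [PySem.List.slice_from buffer (by positivity)]
  simp only [List.length_drop]
  omega

def split_into_list (input : List String) : List (List String) :=
  -- buffer = ""; for chunk in input: buffer += chunk; while … (pvWhileA)
  let st := input.foldl (fun st chunk =>
      let buffer := st.2 ++ chunk.toList
      let r := pvWhileA buffer
      (st.1 ++ r.1, r.2)) (([] : List (List String)), ([] : List Char))
  -- yield [buffer.strip()]
  st.1 ++ [[String.ofList (PySem.Chars.strip st.2)]]

-- ===== PORT B =====
-- for ch in chunk: yield on ',', else append ch to the accumulator
def pvStepB (st : List (List String) × List Char) (ch : Char) : List (List String) × List Char :=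
  if ch = ',' then (st.1 ++ [[String.ofList (PySem.Chars.strip st.2)]], [])
  else (st.1, st.2 ++ [ch])

def split_into_list_alt (input : List String) : List (List String) :=
  let st := input.foldl (fun st chunk => chunk.toList.foldl pvStepB st)
      (([] : List (List String)), ([] : List Char))
  st.1 ++ [[String.ofList (PySem.Chars.strip st.2)]]

-- ===== PRECONDITION & SPEC =====
def Spec_split_into_list (input : List String) (out : List (List String)) : Prop := out = split_into_list_alt input
instance (input : List String) (out : List (List String)) : Decidable (Spec_split_into_list input out) := by unfold Spec_split_into_list; infer_instance

-- ===== CLAIM (what is proved, stated in full; the proofs are below) =====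
def Claim_equal_split_into_list : Prop := ∀ (input : List String), Dom_split_into_list input → Spec_split_into_list input (split_into_list input)

-- ===== LEMMAS AND PROOFS =====

-- reference splitter: the split-the-concatenation-on-',' view of both programs
def pvSp : List Char → List (List Char)
  | [] => [[]]
  | c :: cs => if c = ',' then [] :: pvSp cs else (pvSp cs).modifyHead (c :: ·)

def pvF (l : List Char) : List String := [String.ofList (PySem.Chars.strip l)]

theorem pvSp_ne_nil (cs : List Char) : pvSp cs ≠ [] := by
  induction cs with
  | nil => simp [pvSp]
  | cons c cs ih =>
    simp only [pvSp]
    split_ifs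
    · simp
    · cases h : pvSp cs with
      | nil => exact absurd h ih
      | cons a t => simp

-- prepending comma-free characters only extends the first piece
theorem pvSp_nc_append {a : List Char} (b : List Char) (h : ',' ∉ a) :
    pvSp (a ++ b) = (pvSp b).modifyHead (a ++ ·) := by
  induction a with
  | nil =>
    cases hb : pvSp b with
    | nil => exact absurd hb (pvSp_ne_nil b)
    | cons x t => simp [hb]
  | cons c cs ih =>
    have hc : c ≠ ',' := fun he => h (he ▸ List.mem_cons_self)
    have hcs : ',' ∉ cs := fun hm => h (List.mem_cons_of_mem _ hm)
    rw [List.cons_append, pvSp, if_neg hc, ih hcs]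
    cases hb : pvSp b with
    | nil => exact absurd hb (pvSp_ne_nil b)
    | cons x t => simp

theorem pvSp_no_comma {a : List Char} (h : ',' ∉ a) : pvSp a = [a] := by
  have := pvSp_nc_append [] h
  simpa [pvSp] using this

-- splitting a comma-free prefix then a comma: the piece comes off whole
theorem pvSp_piece {p : List Char} (q : List Char) (hp : ',' ∉ p) :
    pvSp (p ++ ',' :: q) = p :: pvSp q := by
  rw [pvSp_nc_append _ hp, pvSp, if_pos rfl]
  simp

-- the glue lemma: pvSp of a concatenation keeps the earlier pieces and merges at the seam
theorem pvSp_append (x y : List Char) {is : List (List Char)} {lst : List Char}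
    (h : pvSp x = is ++ [lst]) : pvSp (x ++ y) = is ++ pvSp (lst ++ y) := by
  induction x generalizing is lst with
  | nil =>
    cases is with
    | nil =>
      have hlst : lst = [] :=
        ((List.cons_eq_cons.mp (show ([[]] : List (List Char)) = [lst] from h)).1).symm
      subst hlst; simp
    | cons i0 it =>
      exfalso
      have hlen := congrArg List.length h
      simp [pvSp] at hlen
  | cons c cs ih =>
    by_cases hc : c = ','
    · subst hc
      simp only [pvSp] at h
      cases is with
      | nil =>
        exfalso
        have h2 := (List.cons_eq_cons.mp (by simpa using h)).2
        exact pvSp_ne_nil cs h2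
      | cons i0 it =>
        have h2 := List.cons_eq_cons.mp (by simpa using h)
        rw [List.cons_append, pvSp, if_pos rfl, ih h2.2, ← h2.1]
        rfl
    · simp only [pvSp, if_neg hc] at h
      cases hcs : pvSp cs with
      | nil => exact absurd hcs (pvSp_ne_nil cs)
      | cons h0 t =>
        rw [hcs] at h
        simp only [List.modifyHead] at h
        cases is with
        | nil =>
          have h2 := List.cons_eq_cons.mp (by simpa using h)
          have ht : t = [] := h2.2
          have h0e : lst = c :: h0 := h2.1.symm
          have hih := ih (is := []) (lst := h0) (by rw [hcs, ht]; simp)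
          rw [List.nil_append] at hih
          rw [List.cons_append, pvSp, if_neg hc, hih, h0e, List.cons_append, pvSp, if_neg hc]
          cases hpy : pvSp (h0 ++ y) with
          | nil => exact absurd hpy (pvSp_ne_nil _)
          | cons a s => simp
        | cons i0 it =>
          have h2 := List.cons_eq_cons.mp h
          have hdecomp : pvSp cs = (h0 :: it) ++ [lst] := by rw [hcs, h2.2]; rfl
          rw [List.cons_append, pvSp, if_neg hc, ih hdecomp]
          simp [← h2.1]

-- every pvSp result ends in a piece
theorem pvSp_decomp (cs : List Char) : ∃ is lst, pvSp cs = is ++ [lst] := by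
  cases h : pvSp cs with
  | nil => exact absurd h (pvSp_ne_nil cs)
  | cons a t =>
    refine ⟨(a :: t).dropLast, (a :: t).getLast (by simp), ?_⟩
    exact (List.dropLast_append_getLast (by simp)).symm

-- the final piece of a split never contains a comma
theorem pvSp_last_nc (cs : List Char) : ',' ∉ (pvSp cs).getLastD [] := by
  induction cs with
  | nil => simp [pvSp]
  | cons c cs ih =>
    simp only [pvSp]
    split_ifs with hc
    · rwa [List.getLastD_cons]
    · cases h : pvSp cs with
      | nil => exact absurd h (pvSp_ne_nil cs)
      | cons a t =>
        rw [h, List.getLastD_cons] at ih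
        simp only [List.modifyHead, List.getLastD_cons]
        cases t with
        | nil =>
          simp only [List.getLastD_nil] at ih ⊢
          intro hm
          rcases List.mem_cons.mp hm with he | hm'
          · exact hc he.symm
          · exact ih hm'
        | cons b s => simpa using ih

-- characterize buffer.index(","): the scan of find.go on a list containing a comma
theorem pvFindGo_spec (cs : List Char) (k : Nat) (h : ',' ∈ cs) :
    ∃ p q, cs = p ++ ',' :: q ∧ ',' ∉ p ∧
      PySem.Chars.find.go [','] cs k = ((k + p.length : Nat) : Int) := by
  induction cs generalizing k with
  | nil => exact absurd h (List.not_mem_nil)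
  | cons a t ih =>
    by_cases ha : a = ','
    · subst ha
      refine ⟨[], t, rfl, by simp, ?_⟩
      have hpre : ([','].isPrefixOf (',' :: t)) = true := by simp [List.isPrefixOf]
      simp [PySem.Chars.find.go, hpre]
    · have hmem : ',' ∈ t := by
        rcases List.mem_cons.mp h with he | hm
        · exact absurd he.symm ha
        · exact hm
      obtain ⟨p, q, hpq, hp, hgo⟩ := ih (k + 1) hmem
      refine ⟨a :: p, q, by rw [hpq]; rfl, ?_, ?_⟩
      · intro hm
        rcases List.mem_cons.mp hm with he | hm'
        · exact ha he.symm
        · exact hp hm'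
      · have hpre : ([','].isPrefixOf (a :: t)) = false := by
          simp only [List.isPrefixOf, Bool.and_true]
          exact beq_eq_false_iff_ne.mpr (fun he => ha he.symm)
        simp only [PySem.Chars.find.go, hpre, Bool.false_eq_true, if_false, hgo]
        simp; omega

theorem pvFindGo_none (cs : List Char) (k : Nat) (h : ',' ∉ cs) :
    PySem.Chars.find.go [','] cs k = -1 := by
  induction cs generalizing k with
  | nil => simp [PySem.Chars.find.go]
  | cons a t ih =>
    have ha : a ≠ ',' := fun he => h (he ▸ List.mem_cons_self)
    have hpre : ([','].isPrefixOf (a :: t)) = false := by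
      simp only [List.isPrefixOf, Bool.and_true]
      exact beq_eq_false_iff_ne.mpr (fun he => ha he.symm)
    simp only [PySem.Chars.find.go, hpre, Bool.false_eq_true, if_false]
    exact ih _ (fun hm => h (List.mem_cons_of_mem _ hm))

-- the while loop emits every piece but the last and leaves the last as the buffer
theorem pvWhileA_eq (buffer : List Char) :
    pvWhileA buffer = ((pvSp buffer).dropLast.map pvF, (pvSp buffer).getLastD []) := by
  by_cases h : PySem.Chars.isIn [','] buffer = true
  · have hmem : ',' ∈ buffer := by
      by_contra hm
      rw [PySem.Chars.isIn, PySem.Chars.find, pvFindGo_none buffer 0 hm] at h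
      simp at h
    obtain ⟨p, q, hpq, hp, hgo⟩ := pvFindGo_spec buffer 0 hmem
    have hfind : PySem.Chars.find buffer [','] = ((p.length : Nat) : Int) := by
      rw [PySem.Chars.find, hgo]; norm_num
    rw [pvWhileA, dif_pos h]
    simp only [hfind, Int.toNat_natCast]
    have hslice1 : PySem.List.slice buffer none (some ((p.length : Nat) : Int)) = p := by
      rw [PySem.List.slice_to_natCast, hpq, List.take_left]
    have hslice2 : PySem.List.slice buffer (some (((p.length : Nat) : Int) + 1)) none = q := by
      have hcast : (((p.length : Nat) : Int) + 1) = (((p.length + 1 : Nat)) : Int) := by push_cast; ring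
      rw [hcast, PySem.List.slice_from_natCast, hpq]
      rw [show p.length + 1 = (p ++ [',']).length by simp]
      rw [show p ++ ',' :: q = (p ++ [',']) ++ q by simp]
      exact List.drop_left
    rw [hslice1, hslice2, pvWhileA_eq q]
    have hsp : pvSp buffer = p :: pvSp q := by rw [hpq]; exact pvSp_piece q hp
    rw [hsp]
    cases hq : pvSp q with
    | nil => exact absurd hq (pvSp_ne_nil q)
    | cons a t => simp [pvF]
  · have hmem : ',' ∉ buffer := by
      intro hm
      obtain ⟨p, q, _, _, hgo⟩ := pvFindGo_spec buffer 0 hm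
      rw [PySem.Chars.isIn, PySem.Chars.find, hgo] at h
      simp at h
    rw [pvWhileA, dif_neg h, pvSp_no_comma hmem]
    simp
termination_by buffer.length
decreasing_by
  rw [hpq]
  simp only [List.length_append, List.length_cons]
  omega

-- B's inner character fold computes the pvSp split of (accumulator ++ chars)
theorem pvStepB_fold (cs : List Char) (out : List (List String)) (cur : List Char)
    (hcur : ',' ∉ cur) :
    (cs.foldl pvStepB (out, cur)).1 ++ [pvF (cs.foldl pvStepB (out, cur)).2] =
      out ++ (pvSp (cur ++ cs)).map pvF := by
  induction cs generalizing out cur with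
  | nil => simp [pvSp_no_comma hcur, pvF]
  | cons c cs ih =>
    by_cases hc : c = ','
    · subst hc
      rw [List.foldl_cons]
      have hstep : pvStepB (out, cur) ',' = (out ++ [pvF cur], []) := by
        simp [pvStepB, pvF]
      rw [hstep, ih _ _ (by simp), pvSp_piece cs hcur]
      simp
    · rw [List.foldl_cons]
      have hstep : pvStepB (out, cur) c = (out, cur ++ [c]) := by
        simp [pvStepB, hc]
      have hcur' : ',' ∉ cur ++ [c] := by
        intro hm
        rcases List.mem_append.mp hm with hm' | hm'
        · exact hcur hm'
        · have h' : ',' = c := by simpa using hm'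
          exact hc h'.symm
      rw [hstep, ih _ _ hcur']
      simp

-- B's chunk fold over the chunks is the character fold over the concatenation
theorem pvFoldB_flat (chunks : List String) (st : List (List String) × List Char) :
    chunks.foldl (fun st chunk => chunk.toList.foldl pvStepB st) st =
      ((chunks.map String.toList).flatten).foldl pvStepB st := by
  induction chunks generalizing st with
  | nil => simp
  | cons c cs ih => simp [List.foldl_append, ih]

-- A's chunk fold: the invariant is that the carried buffer is comma-free
theorem pvLoopA (chunks : List String) (out : List (List String)) (b : List Char)
    (hb : ',' ∉ b) :
    (chunks.foldl (fun st chunk =>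
        let buffer := st.2 ++ chunk.toList
        let r := pvWhileA buffer
        (st.1 ++ r.1, r.2)) (out, b)).1 ++
      [pvF (chunks.foldl (fun st chunk =>
        let buffer := st.2 ++ chunk.toList
        let r := pvWhileA buffer
        (st.1 ++ r.1, r.2)) (out, b)).2] =
      out ++ (pvSp (b ++ (chunks.map String.toList).flatten)).map pvF := by
  induction chunks generalizing out b with
  | nil => simp [pvSp_no_comma hb, pvF]
  | cons c cs ih =>
    rw [List.foldl_cons]
    obtain ⟨is, lst, hdec⟩ := pvSp_decomp (b ++ c.toList)
    have hw := pvWhileA_eq (b ++ c.toList)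
    rw [hdec] at hw
    simp only [List.dropLast_concat, List.getLastD_concat] at hw
    have hlstnc : ',' ∉ lst := by
      have := pvSp_last_nc (b ++ c.toList)
      rwa [hdec, List.getLastD_concat] at this
    simp only [hw]
    rw [ih _ _ hlstnc]
    have hglue : pvSp (b ++ (c.toList ++ ((cs.map String.toList).flatten))) =
        is ++ pvSp (lst ++ (cs.map String.toList).flatten) := by
      rw [← List.append_assoc]
      exact pvSp_append _ _ hdec
    simp only [List.map_cons, List.flatten_cons, hglue]
    simp

-- ===== VERDICT (by name: the statement is the Claim_ definition above) =====
theorem split_into_list_spec : Claim_equal_split_into_list := by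
  intro input _
  unfold Spec_split_into_list split_into_list split_into_list_alt
  have hA := pvLoopA input [] [] List.not_mem_nil
  have hBflat := pvFoldB_flat input (([] : List (List String)), ([] : List Char))
  have hB := pvStepB_fold ((input.map String.toList).flatten) [] [] List.not_mem_nil
  simp only [List.nil_append] at hA hB
  simp only [hBflat]
  simp only [pvF] at hA hB
  rw [hA, hB]
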